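-- pv_equiv track=rewrite | github.com/jayu9596/experiments | portfolio/simulate8Clients/portFolioSimulate.py | getClientWiseInliningData
-- ===== SOURCE A (Python) =====
-- import copy
--
-- def getClientWiseInliningData(runStatsTime, run, folder):
-- 	plotData = copy.deepcopy(runStatsTime[run][folder])
-- 	for key, value in plotData.items():
-- 		prevValue = 0
-- 		for val in value:
-- 			if val[1] == 0:
-- 				prevValue = 0
-- 			else:
-- 				val[1] = prevValue + val[1]
-- 				prevValue = val[1]
-- 	return plotData
-- ===== SOURCE B (Python) =====
-- import copy
-- from itertools import accumulate
--
--
-- def getClientWiseInliningData(runStatsTime, run, folder):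
--     plotData = copy.deepcopy(runStatsTime[run][folder])
--     for value in plotData.values():
--         seconds = [val[1] for val in value]
--         running = accumulate(seconds, lambda acc, b: b if b == 0 else acc + b)
--         for val, s in zip(value, running):
--             val[1] = s
--     return plotData
-- ===== Notes on version B (the rewrite author's own statement) =====
-- stated objective: idiomatic
-- what changed: The explicit prevValue state machine per series is replaced by an extract->itertools.accumulate (reset-on-zero fold)->zip write-back decomposition.
-- outside the precondition, e.g. on getClientWiseInliningData({'r': {'f': {'k': [[1]]}}}, 'r', 'f'): A raises IndexError, B raises IndexError; on getClientWiseInliningData({}, 'r', 'f'): A raises KeyError, B raises KeyError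
import Mathlib
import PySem

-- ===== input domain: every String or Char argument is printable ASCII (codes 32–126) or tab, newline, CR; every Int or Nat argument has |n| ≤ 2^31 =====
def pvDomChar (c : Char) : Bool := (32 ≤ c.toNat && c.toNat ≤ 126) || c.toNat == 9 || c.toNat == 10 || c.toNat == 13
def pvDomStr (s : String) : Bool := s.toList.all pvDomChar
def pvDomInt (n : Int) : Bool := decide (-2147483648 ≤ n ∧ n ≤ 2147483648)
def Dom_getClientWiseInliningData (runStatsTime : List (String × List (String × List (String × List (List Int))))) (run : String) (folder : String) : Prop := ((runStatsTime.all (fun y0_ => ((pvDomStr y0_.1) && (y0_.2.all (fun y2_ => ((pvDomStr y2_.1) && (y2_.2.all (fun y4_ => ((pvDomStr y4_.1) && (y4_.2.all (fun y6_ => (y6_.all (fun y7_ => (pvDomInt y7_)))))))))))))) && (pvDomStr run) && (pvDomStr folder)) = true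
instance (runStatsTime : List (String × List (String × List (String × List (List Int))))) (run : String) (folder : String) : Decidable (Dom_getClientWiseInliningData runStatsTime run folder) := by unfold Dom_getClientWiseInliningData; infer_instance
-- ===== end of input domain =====

-- B replaces the explicit prevValue loop by an extract -> accumulate (reset-on-zero fold) -> zip write-back decomposition; same cost, more idiomatic.



-- ===== PORT A =====
-- inner loop of A: 'prevValue = 0; for val in value: if val[1]==0: prevValue=0 else: val[1]=prevValue+val[1]; prevValue=val[1]'
-- (val[1] is read as pyGetD val 1 0 and written with List.set 1; Pre_ guarantees every val has length ≥ 2, where both are Python-exact)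
def pvCumA : List (List Int) → Int → List (List Int)
  | [], _ => []
  | val :: rest, prevValue =>
    if PySem.List.pyGetD val 1 0 = 0 then
      val :: pvCumA rest 0
    else
      let val' := val.set 1 (prevValue + PySem.List.pyGetD val 1 0)
      val' :: pvCumA rest (prevValue + PySem.List.pyGetD val 1 0)

def getClientWiseInliningData (runStatsTime : List (String × List (String × List (String × List (List Int))))) (run : String) (folder : String) : List (String × List (List Int)) :=
  match (PySem.Dict.ofList runStatsTime).get? run with
  | none => []  -- KeyError; excluded by Pre_
  | some lvl2 =>
    match (PySem.Dict.ofList lvl2).get? folder with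
    | none => []  -- KeyError; excluded by Pre_
    | some pd =>
      ((PySem.Dict.ofList pd).items).map (fun kv => (kv.1, pvCumA kv.2 0))

-- ===== PORT B =====
-- the accumulate step: lambda acc, b: b if b == 0 else acc + b
def pvStepB (acc b : Int) : Int := if b = 0 then b else acc + b

def getClientWiseInliningData_alt (runStatsTime : List (String × List (String × List (String × List (List Int))))) (run : String) (folder : String) : List (String × List (List Int)) :=
  match (PySem.Dict.ofList runStatsTime).get? run with
  | none => []  -- KeyError; excluded by Pre_
  | some lvl2 =>
    match (PySem.Dict.ofList lvl2).get? folder with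
    | none => []  -- KeyError; excluded by Pre_
    | some pd =>
      ((PySem.Dict.ofList pd).items).map (fun kv =>
        let seconds := kv.2.map (fun val => PySem.List.pyGetD val 1 0)
        -- itertools.accumulate(seconds, pvStepB): first element passed through, then folded
        let running := match seconds with
          | [] => []
          | x :: xs => List.scanl pvStepB x xs
        (kv.1, (kv.2.zip running).map (fun p => p.1.set 1 p.2)))

-- ===== PRECONDITION & SPEC =====
-- Pre_ excludes exactly the inputs where the Python raises: a missing run/folder key (KeyError)
-- and any series element of length < 2 in the selected plot data (IndexError on val[1]).
def Pre_getClientWiseInliningData (runStatsTime : List (String × List (String × List (String × List (List Int))))) (run : String) (folder : String) : Prop :=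
  (((PySem.Dict.ofList runStatsTime).get? run).bind
      (fun lvl2 => (PySem.Dict.ofList lvl2).get? folder)).isSome = true ∧
  ∀ kv ∈ (PySem.Dict.ofList ((((PySem.Dict.ofList runStatsTime).get? run).bind
      (fun lvl2 => (PySem.Dict.ofList lvl2).get? folder)).getD [])).items,
    ∀ val ∈ kv.2, 2 ≤ val.length
instance (runStatsTime : List (String × List (String × List (String × List (List Int))))) (run : String) (folder : String) : Decidable (Pre_getClientWiseInliningData runStatsTime run folder) := by unfold Pre_getClientWiseInliningData; infer_instance

def pvWitness_getClientWiseInliningData : (List (String × List (String × List (String × List (List Int))))) × String × String :=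
  ([("r", [("f", [("cl", [[1, 2], [0, 0], [3, 4], [5, -1]])])])], "r", "f")

def Spec_getClientWiseInliningData (runStatsTime : List (String × List (String × List (String × List (List Int))))) (run : String) (folder : String) (out : List (String × List (List Int))) : Prop := out = getClientWiseInliningData_alt runStatsTime run folder
instance (runStatsTime : List (String × List (String × List (String × List (List Int))))) (run : String) (folder : String) (out : List (String × List (List Int))) : Decidable (Spec_getClientWiseInliningData runStatsTime run folder out) := by unfold Spec_getClientWiseInliningData; infer_instance

-- ===== CLAIM (what is proved, stated in full; the proofs are below) =====
def Claim_equal_getClientWiseInliningData : Prop := ∀ (runStatsTime : List (String × List (String × List (String × List (List Int))))) (run : String) (folder : String), Dom_getClientWiseInliningData runStatsTime run folder → Pre_getClientWiseInliningData runStatsTime run folder → Spec_getClientWiseInliningData runStatsTime run folder (getClientWiseInliningData runStatsTime run folder)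

-- ===== LEMMAS AND PROOFS =====

-- the accumulator sequence both programs produce, as a standalone recursion
def pvAccB (prev : Int) : List (List Int) → List Int
  | [] => []
  | val :: rest =>
    pvStepB prev (PySem.List.pyGetD val 1 0) :: pvAccB (pvStepB prev (PySem.List.pyGetD val 1 0)) rest

theorem pvStepB_zero (b : Int) : pvStepB 0 b = b := by
  unfold pvStepB; split <;> omega

theorem scanl_eq_accB (value : List (List Int)) (prev : Int) :
    List.scanl pvStepB prev (value.map (fun val => PySem.List.pyGetD val 1 0)) =
      prev :: pvAccB prev value := by
  induction value generalizing prev with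
  | nil => rfl
  | cons v rest ih => simp [List.scanl_cons, pvAccB, ih]

theorem cumA_eq_zip_accB (value : List (List Int)) (prev : Int)
    (h : ∀ val ∈ value, 2 ≤ val.length) :
    pvCumA value prev =
      (value.zip (pvAccB prev value)).map (fun p => p.1.set 1 p.2) := by
  induction value generalizing prev with
  | nil => rfl
  | cons v rest ih =>
    have hv : 2 ≤ v.length := h v (by simp)
    have hrest : ∀ val ∈ rest, 2 ≤ val.length := fun val hm => h val (by simp [hm])
    have h1lt : 1 < v.length := by omega
    have hget : PySem.List.pyGetD v 1 0 = v[1]'h1lt := by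
      simp [PySem.List.pyGetD, PySem.List.pyGet?, PySem.List.pyIdx?, h1lt]
    by_cases hz : PySem.List.pyGetD v 1 0 = 0
    · have hvz : v[1]'h1lt = (0 : Int) := by rw [← hget]; exact hz
      have hset : v.set 1 (0 : Int) = v := by
        conv_lhs => rw [← hvz]
        exact List.set_getElem_self h1lt
      have hsz : pvStepB prev 0 = 0 := by simp [pvStepB]
      simp only [pvCumA, pvAccB, hz, hsz, List.zip_cons_cons, List.map_cons, hset, if_true]
      rw [ih 0 hrest]
    · have hs : pvStepB prev (PySem.List.pyGetD v 1 0) = prev + PySem.List.pyGetD v 1 0 := by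
        simp [pvStepB, hz]
      simp only [pvCumA, if_neg hz, pvAccB, List.zip_cons_cons, List.map_cons, hs]
      rw [ih (prev + PySem.List.pyGetD v 1 0) hrest]

theorem entry_eq (value : List (List Int)) (h : ∀ val ∈ value, 2 ≤ val.length) :
    pvCumA value 0 =
      (value.zip (match value.map (fun val => PySem.List.pyGetD val 1 0) with
                  | [] => []
                  | x :: xs => List.scanl pvStepB x xs)).map (fun p => p.1.set 1 p.2) := by
  cases value with
  | nil => rfl
  | cons v rest =>
    rw [cumA_eq_zip_accB _ 0 h]
    simp only [List.map_cons]
    rw [scanl_eq_accB rest (PySem.List.pyGetD v 1 0)]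
    simp [pvAccB, pvStepB_zero]

-- ===== VERDICT (by name: the statement is the Claim_ definition above) =====
theorem getClientWiseInliningData_spec : Claim_equal_getClientWiseInliningData := by
  intro runStatsTime run folder _ hpre
  obtain ⟨hsome, hlen⟩ := hpre
  unfold Spec_getClientWiseInliningData getClientWiseInliningData getClientWiseInliningData_alt
  cases h1 : (PySem.Dict.ofList runStatsTime).get? run with
  | none => simp [h1] at hsome
  | some lvl2 =>
    cases h2 : (PySem.Dict.ofList lvl2).get? folder with
    | none => simp [h1, h2] at hsome
    | some pd =>
      simp only [h2]
      apply List.map_congr_left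
      intro kv hkv
      have hklen : ∀ val ∈ kv.2, 2 ≤ val.length := by
        intro val hval
        exact hlen kv (by simpa [h1, h2] using hkv) val hval
      exact congrArg (Prod.mk kv.1) (entry_eq kv.2 hklen)
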